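-- pv_equiv track=rewrite | github.com/akshirapov/think-python | 18-inheritance/ex_18_12_3.py | ranks_in_a_row
-- ===== SOURCE A (Python) =====
-- def ranks_in_a_row(ranks, n=5):
--     """Checks whether the histogram has n ranks in a row.
--
--     :param ranks: map from rank to frequency
--     :param n: number we need to get to
--     """
--     count = 0
--     for i in range(1, 15):
--         if ranks.get(i, 0):
--             count += 1
--             if count == n:
--                 return True
--         else:
--             count = 0
--
--     return False
-- ===== SOURCE B (Python) =====
-- def ranks_in_a_row(ranks, n=5):
--     """Checks whether the histogram has n ranks in a row.
--
--     Sliding-window search: test each candidate block of n consecutive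
--     ranks independently instead of threading one running counter.
--     """
--     if n < 1:
--         return False
--     for start in range(1, 16 - n):
--         if all(ranks.get(start + j, 0) for j in range(n)):
--             return True
--     return False
-- ===== Notes on version B (the rewrite author's own statement) =====
-- stated objective: alternative
-- what changed: Replaced the single pass with a running consecutive counter by an independent sliding-window search: for each candidate start 1..15-n, check whether all n ranks of that window are present, returning on the first fully-present window.
import Mathlib
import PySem

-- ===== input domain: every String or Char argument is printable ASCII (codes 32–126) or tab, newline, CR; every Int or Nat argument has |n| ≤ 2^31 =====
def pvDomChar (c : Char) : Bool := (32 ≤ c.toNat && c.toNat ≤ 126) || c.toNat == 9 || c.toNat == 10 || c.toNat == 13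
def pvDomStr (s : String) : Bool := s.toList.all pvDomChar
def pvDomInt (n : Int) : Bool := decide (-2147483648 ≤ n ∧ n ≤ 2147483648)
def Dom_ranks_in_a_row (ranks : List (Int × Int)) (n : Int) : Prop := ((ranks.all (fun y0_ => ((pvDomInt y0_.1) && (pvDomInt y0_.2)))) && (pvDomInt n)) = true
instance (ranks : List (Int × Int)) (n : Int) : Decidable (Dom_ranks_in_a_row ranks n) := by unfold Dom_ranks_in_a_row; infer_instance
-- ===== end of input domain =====

-- B replaces A's single running-count pass by an independent sliding-window search (alternative decomposition, same cost class).

-- ===== PORT A =====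
-- the for-loop with its `count` accumulator and early `return True`, as structural recursion over range(1, 15)
def goA (ranks : List (Int × Int)) (n : Int) : List Int → Int → Bool
  | [], _ => false
  | i :: rest, count =>
    if PySem.Dict.getD (PySem.Dict.mk ranks) i (0:Int) ≠ 0 then
      if count + 1 = n then true else goA ranks n rest (count + 1)
    else goA ranks n rest 0

def ranks_in_a_row (ranks : List (Int × Int)) (n : Int) : Bool :=
  goA ranks n (PySem.List.pyRange 1 15 1) 0

-- ===== PORT B =====
def ranks_in_a_row_alt (ranks : List (Int × Int)) (n : Int) : Bool :=
  if n < 1 then false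
  else
    (PySem.List.pyRange 1 (16 - n) 1).any fun start =>
      (PySem.List.pyRange 0 n 1).all fun j =>
        decide (PySem.Dict.getD (PySem.Dict.mk ranks) (start + j) (0:Int) ≠ 0)

-- ===== PRECONDITION & SPEC =====
def Spec_ranks_in_a_row (ranks : List (Int × Int)) (n : Int) (out : Bool) : Prop := out = ranks_in_a_row_alt ranks n
instance (ranks : List (Int × Int)) (n : Int) (out : Bool) : Decidable (Spec_ranks_in_a_row ranks n out) := by unfold Spec_ranks_in_a_row; infer_instance

-- ===== CLAIM (what is proved, stated in full; the proofs are below) =====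
def Claim_equal_ranks_in_a_row : Prop := ∀ (ranks : List (Int × Int)) (n : Int), Dom_ranks_in_a_row ranks n → Spec_ranks_in_a_row ranks n (ranks_in_a_row ranks n)

-- ===== LEMMAS AND PROOFS =====

-- A's loop never returns True when n ≤ 0 (the count is always positive when tested).
theorem goA_of_nonpos (ranks : List (Int × Int)) (n : Int) (hn : n ≤ 0) :
    ∀ (L : List Int) (c : Int), 0 ≤ c → goA ranks n L c = false := by
  intro L
  induction L with
  | nil => intro c _; simp [goA]
  | cons i rest ih =>
    intro c hc
    by_cases hp : PySem.Dict.getD (PySem.Dict.mk ranks) i (0:Int) ≠ 0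
    · have hne : ¬ (c + 1 = n) := by omega
      simp only [goA, if_pos hp, if_neg hne]
      exact ih (c + 1) (by omega)
    · simp only [goA, if_neg hp]
      exact ih 0 le_rfl

-- Characterisation of A's loop: it returns True iff the initial run completes to n,
-- or some window of n consecutive indices of L is fully present.
theorem goA_iff (ranks : List (Int × Int)) (n : Int) :
    ∀ (L : List Int) (c : Int), 0 ≤ c → c < n →
    (goA ranks n L c = true ↔
      (∃ k : Nat, (k : Int) + c = n ∧ k ≤ L.length ∧
        ∀ j : Nat, j < k → PySem.Dict.getD (PySem.Dict.mk ranks) (L.getD j 0) (0:Int) ≠ 0) ∨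
      (∃ s k : Nat, (k : Int) = n ∧ s + k ≤ L.length ∧
        ∀ j : Nat, j < k → PySem.Dict.getD (PySem.Dict.mk ranks) (L.getD (s + j) 0) (0:Int) ≠ 0)) := by
  intro L
  induction L with
  | nil =>
    intro c hc0 hcn
    simp only [goA, List.length_nil]
    constructor
    · intro h; cases h
    · rintro (⟨k, hk, hkl, -⟩ | ⟨s, k, hk, hkl, -⟩) <;> omega
  | cons i rest ih =>
    intro c hc0 hcn
    by_cases hp : PySem.Dict.getD (PySem.Dict.mk ranks) i (0:Int) ≠ 0
    · by_cases hn : c + 1 = n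
      · simp only [goA, if_pos hp, if_pos hn]
        constructor
        · intro _
          exact Or.inl ⟨1, by omega, by simp, by
            intro j hj
            interval_cases j
            simpa using hp⟩
        · intro _; trivial
      · simp only [goA, if_pos hp, if_neg hn]
        rw [ih (c + 1) (by omega) (by omega)]
        constructor
        · rintro (⟨k, hk, hkl, hall⟩ | ⟨s, k, hk, hkl, hall⟩)
          · exact Or.inl ⟨k + 1, by omega, by simp; omega, by
              intro j hj
              cases j with
              | zero => simpa using hp
              | succ j => simpa using hall j (by omega)⟩
          · exact Or.inr ⟨s + 1, k, hk, by simp; omega, by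
              intro j hj
              have h1 : s + 1 + j = (s + j) + 1 := by omega
              rw [h1, List.getD_cons_succ]
              exact hall j hj⟩
        · rintro (⟨k, hk, hkl, hall⟩ | ⟨s, k, hk, hkl, hall⟩)
          · cases k with
            | zero => omega
            | succ k =>
              exact Or.inl ⟨k, by push_cast at hk ⊢; omega, by simp at hkl; omega, by
                intro j hj
                simpa using hall (j + 1) (by omega)⟩
          · cases s with
            | zero =>
              refine Or.inl ⟨(n - (c + 1)).toNat, by omega, by simp at hkl; omega, ?_⟩
              intro j hj
              have hjk : j + 1 < k := by omega
              have := hall (j + 1) hjk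
              simpa using this
            | succ s =>
              exact Or.inr ⟨s, k, hk, by simp at hkl; omega, by
                intro j hj
                have := hall j hj
                have h1 : s + 1 + j = (s + j) + 1 := by omega
                rw [h1, List.getD_cons_succ] at this
                exact this⟩
    · simp only [goA, if_neg hp]
      rw [ih 0 le_rfl (by omega)]
      constructor
      · rintro (⟨k, hk, hkl, hall⟩ | ⟨s, k, hk, hkl, hall⟩)
        · exact Or.inr ⟨1, k, by omega, by simp; omega, by
            intro j hj
            have h1 : 1 + j = j + 1 := by omega
            rw [h1, List.getD_cons_succ]
            exact hall j hj⟩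
        · exact Or.inr ⟨s + 1, k, hk, by simp; omega, by
            intro j hj
            have h1 : s + 1 + j = (s + j) + 1 := by omega
            rw [h1, List.getD_cons_succ]
            exact hall j hj⟩
      · rintro (⟨k, hk, hkl, hall⟩ | ⟨s, k, hk, hkl, hall⟩)
        · exfalso
          have hk1 : 0 < k := by omega
          have := hall 0 hk1
          simp at this
          exact hp this
        · cases s with
          | zero =>
            exfalso
            have hk1 : 0 < k := by omega
            have := hall 0 hk1
            simp at this
            exact hp this
          | succ s =>
            refine Or.inr ⟨s, k, hk, by simp at hkl; omega, ?_⟩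
            intro j hj
            have := hall j hj
            have h1 : s + 1 + j = (s + j) + 1 := by omega
            rw [h1, List.getD_cons_succ] at this
            exact this

theorem pyRange14_len : (PySem.List.pyRange 1 15 1).length = 14 := by decide

theorem pyRange14_getD : ∀ m : Nat, m < 14 → (PySem.List.pyRange 1 15 1).getD m 0 = 1 + (m : Int) := by decide

-- A, for 1 ≤ n: some window [start, start+n) inside [1, 15) is fully present.
theorem ranks_in_a_row_char (ranks : List (Int × Int)) (n : Int) (hn : 1 ≤ n) :
    (ranks_in_a_row ranks n = true ↔
      ∃ s k : Nat, (k : Int) = n ∧ s + k ≤ 14 ∧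
        ∀ j : Nat, j < k → PySem.Dict.getD (PySem.Dict.mk ranks) (1 + (s + j : Nat) : Int) (0:Int) ≠ 0) := by
  unfold ranks_in_a_row
  rw [goA_iff ranks n (PySem.List.pyRange 1 15 1) 0 le_rfl (by omega)]
  rw [pyRange14_len]
  constructor
  · rintro (⟨k, hk, hkl, hall⟩ | ⟨s, k, hk, hkl, hall⟩)
    · refine ⟨0, k, by omega, by omega, ?_⟩
      intro j hj
      have := hall j hj
      rw [pyRange14_getD j (by omega)] at this
      simpa using this
    · refine ⟨s, k, hk, hkl, ?_⟩
      intro j hj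
      have := hall j hj
      rwa [pyRange14_getD (s + j) (by omega)] at this
  · rintro ⟨s, k, hk, hkl, hall⟩
    refine Or.inr ⟨s, k, hk, hkl, ?_⟩
    intro j hj
    rw [pyRange14_getD (s + j) (by omega)]
    exact hall j hj

-- B, for 1 ≤ n: some start in [1, 16-n) has all of its window present.
theorem ranks_in_a_row_alt_char (ranks : List (Int × Int)) (n : Int) (hn : 1 ≤ n) :
    (ranks_in_a_row_alt ranks n = true ↔
      ∃ start : Int, 1 ≤ start ∧ start < 16 - n ∧
        ∀ j : Int, 0 ≤ j → j < n → PySem.Dict.getD (PySem.Dict.mk ranks) (start + j) (0:Int) ≠ 0) := by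
  unfold ranks_in_a_row_alt
  rw [if_neg (by omega : ¬ n < 1)]
  rw [List.any_eq_true]
  constructor
  · rintro ⟨start, hmem, hall⟩
    rw [PySem.List.mem_pyRange_one] at hmem
    refine ⟨start, hmem.1, hmem.2, ?_⟩
    intro j hj0 hjn
    rw [List.all_eq_true] at hall
    have := hall j (by rw [PySem.List.mem_pyRange_one]; exact ⟨hj0, hjn⟩)
    simpa using this
  · rintro ⟨start, h1, h2, hall⟩
    refine ⟨start, by rw [PySem.List.mem_pyRange_one]; exact ⟨h1, h2⟩, ?_⟩
    rw [List.all_eq_true]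
    intro j hj
    rw [PySem.List.mem_pyRange_one] at hj
    simpa using hall j hj.1 hj.2

-- ===== VERDICT (by name: the statement is the Claim_ definition above) =====
theorem ranks_in_a_row_spec : Claim_equal_ranks_in_a_row := by
  intro ranks n _
  unfold Spec_ranks_in_a_row
  by_cases hn0 : n < 1
  · rw [ranks_in_a_row_alt, if_pos hn0]
    exact goA_of_nonpos ranks n (by omega) _ 0 le_rfl
  · push_neg at hn0
    by_cases hbig : 15 ≤ n
    · have hA : ranks_in_a_row ranks n = false := by
        rw [← Bool.not_eq_true, ranks_in_a_row_char ranks n (by omega)]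
        rintro ⟨s, k, hk, hkl, -⟩; omega
      have hB : ranks_in_a_row_alt ranks n = false := by
        unfold ranks_in_a_row_alt
        rw [if_neg (by omega : ¬ n < 1)]
        rw [PySem.List.pyRange_one_eq_nil (by omega : (16 : Int) - n ≤ 1)]
        rfl
      rw [hA, hB]
    · push_neg at hbig
      rw [Bool.eq_iff_iff, ranks_in_a_row_char ranks n hn0, ranks_in_a_row_alt_char ranks n hn0]
      constructor
      · rintro ⟨s, k, hk, hkl, hall⟩
        refine ⟨(s : Int) + 1, by omega, by omega, ?_⟩
        intro j hj0 hjn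
        have hjk : j.toNat < k := by omega
        have := hall j.toNat hjk
        have harg : (1 + (s + j.toNat : Nat) : Int) = (s : Int) + 1 + j := by
          push_cast; omega
        rwa [harg] at this
      · rintro ⟨start, h1, h2, hall⟩
        refine ⟨(start - 1).toNat, n.toNat, by omega, by omega, ?_⟩
        intro j hj
        have hj' : (j : Int) < n := by omega
        have := hall (j : Int) (by omega) hj'
        have harg : (1 + ((start - 1).toNat + j : Nat) : Int) = start + (j : Int) := by
          push_cast; omega
        rwa [harg]
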